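-- pv_equiv track=rewrite | github.com/vkadu68/Algorithm-visualizer- | AlogVisulizer.py | getColorArray
-- ===== SOURCE A (Python) =====
-- def getColorArray(length, left,middle,right):
--     colorArray=[]
--     for i in range(length):
--         if i > left and i <= right:
--             if i >= left and i <= middle:
--                 colorArray.append('yellow')
--             else:
--                 colorArray.append('black')
--         else:
--             colorArray.append('White')
--     return colorArray
-- ===== SOURCE B (Python) =====
-- def getColorArray(length, left, middle, right):
--     colors = ['White'] * length
--     for i in range(max(left + 1, 0), min(min(middle, right) + 1, length)):
--         colors[i] = 'yellow'
--     for i in range(max(max(left, middle) + 1, 0), min(right + 1, length)):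
--         colors[i] = 'black'
--     return colors
-- ===== Notes on version B (the rewrite author's own statement) =====
-- stated objective: alternative
-- what changed: B paints a White background and then writes the yellow interval (left, min(middle,right)] and the black interval (max(left,middle), right] into it, instead of A's per-index loop with nested branching.
import Mathlib
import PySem

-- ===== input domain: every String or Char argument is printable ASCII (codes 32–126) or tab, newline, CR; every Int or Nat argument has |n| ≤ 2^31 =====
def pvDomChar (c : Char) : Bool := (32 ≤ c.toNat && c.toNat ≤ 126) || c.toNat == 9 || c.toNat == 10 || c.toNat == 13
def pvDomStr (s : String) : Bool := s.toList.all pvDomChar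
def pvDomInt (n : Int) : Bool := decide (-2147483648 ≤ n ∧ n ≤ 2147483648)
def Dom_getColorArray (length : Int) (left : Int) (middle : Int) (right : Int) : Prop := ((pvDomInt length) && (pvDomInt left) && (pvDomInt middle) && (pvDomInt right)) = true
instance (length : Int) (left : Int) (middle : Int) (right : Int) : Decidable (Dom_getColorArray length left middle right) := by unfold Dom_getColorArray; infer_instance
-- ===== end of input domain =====

-- B paints a White background and then writes the yellow and black intervals into it,
-- instead of A's per-index loop with nested branching (objective: alternative).

-- ===== PORT A =====
-- per-index loop: for i in range(length), append one colour chosen by the nested if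
def getColorArray (length : Int) (left : Int) (middle : Int) (right : Int) : List String :=
  (PySem.List.pyRange 0 length 1).foldl
    (fun colorArray i =>
      if left < i ∧ i ≤ right then
        if left ≤ i ∧ i ≤ middle then colorArray ++ ["yellow"]
        else colorArray ++ ["black"]
      else colorArray ++ ["White"])
    []

-- ===== PORT B =====
-- White background, then two in-place interval fills (Python: colors[i] = …)
def getColorArray_alt (length : Int) (left : Int) (middle : Int) (right : Int) : List String :=
  let colors := List.replicate length.toNat "White"
  let colors := (PySem.List.pyRange (max (left + 1) 0) (min (min middle right + 1) length) 1).foldl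
    (fun cs i => cs.set i.toNat "yellow") colors
  let colors := (PySem.List.pyRange (max (max left middle + 1) 0) (min (right + 1) length) 1).foldl
    (fun cs i => cs.set i.toNat "black") colors
  colors

-- ===== PRECONDITION & SPEC =====
def Spec_getColorArray (length : Int) (left : Int) (middle : Int) (right : Int) (out : List String) : Prop := out = getColorArray_alt length left middle right
instance (length : Int) (left : Int) (middle : Int) (right : Int) (out : List String) : Decidable (Spec_getColorArray length left middle right out) := by unfold Spec_getColorArray; infer_instance

-- ===== CLAIM =====
def Claim_equal_getColorArray : Prop := ∀ (length : Int) (left : Int) (middle : Int) (right : Int), Dom_getColorArray length left middle right → Spec_getColorArray length left middle right (getColorArray length left middle right)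

-- ===== LEMMAS AND PROOFS =====

-- folding 'set' over a list of indices keeps the length
theorem foldl_set_length (v : String) : ∀ (l : List Int) (cs : List String),
    (l.foldl (fun cs i => cs.set i.toNat v) cs).length = cs.length := by
  intro l
  induction l with
  | nil => intro cs; rfl
  | cons i rest ih => intro cs; simp [List.foldl_cons, ih]

-- element of a fold of 'set's: v where some index hits k (in bounds), the old entry otherwise
theorem foldl_set_getElem? (v : String) : ∀ (l : List Int) (cs : List String) (k : Nat),
    (l.foldl (fun cs i => cs.set i.toNat v) cs)[k]? =
      if ∃ i ∈ l, i.toNat = k ∧ k < cs.length then some v else cs[k]? := by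
  intro l
  induction l with
  | nil => intro cs k; simp
  | cons i rest ih =>
    intro cs k
    rw [List.foldl_cons, ih]
    have hlen : (cs.set i.toNat v).length = cs.length := by simp
    rw [hlen]
    by_cases hrest : ∃ j ∈ rest, j.toNat = k ∧ k < cs.length
    · rw [if_pos hrest, if_pos]
      obtain ⟨j, hj, hjk⟩ := hrest
      exact ⟨j, List.mem_cons_of_mem _ hj, hjk⟩
    · rw [if_neg hrest]
      by_cases hi : i.toNat = k ∧ k < cs.length
      · rw [if_pos ⟨i, List.mem_cons_self, hi⟩]
        rw [List.getElem?_set, if_pos hi.1, if_pos (by rw [hi.1]; exact hi.2)]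
      · rw [if_neg (by
          rintro ⟨j, hj, hjk⟩
          rcases List.mem_cons.mp hj with rfl | hj'
          · exact hi hjk
          · exact hrest ⟨j, hj', hjk⟩)]
        rw [List.getElem?_set]
        rcases Decidable.em (i.toNat = k) with heq | hne
        · have hnk : ¬ k < cs.length := fun h => hi ⟨heq, h⟩
          rw [if_pos heq, if_neg (by rw [heq]; exact hnk)]
          exact (List.getElem?_eq_none_iff.mpr (by omega)).symm
        · rw [if_neg hne]

-- interval fill with a nonnegative lower bound
theorem fill_getElem? (v : String) (a b : Int) (ha : 0 ≤ a) (cs : List String) (k : Nat) :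
    ((PySem.List.pyRange a b 1).foldl (fun cs i => cs.set i.toNat v) cs)[k]? =
      if a ≤ (k : Int) ∧ (k : Int) < b ∧ k < cs.length then some v else cs[k]? := by
  rw [foldl_set_getElem?]
  congr 1
  simp only [PySem.List.mem_pyRange_one, eq_iff_iff]
  constructor
  · rintro ⟨i, ⟨hai, hib⟩, hik, hk⟩
    have : i = (k : Int) := by omega
    subst this
    exact ⟨hai, hib, hk⟩
  · rintro ⟨hak, hkb, hk⟩
    exact ⟨(k : Int), ⟨hak, hkb⟩, by omega, hk⟩

-- the colour A assigns to index k
def colourAt (left middle right : Int) (k : Nat) : String :=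
  if left < (k : Int) ∧ (k : Int) ≤ right then
    if left ≤ (k : Int) ∧ (k : Int) ≤ middle then "yellow" else "black"
  else "White"

theorem getColorArray_eq_map (length left middle right : Int) :
    getColorArray length left middle right =
      (List.range length.toNat).map (colourAt left middle right) := by
  unfold getColorArray
  rw [PySem.List.pyRange_one]
  have : ∀ (l : List Int),
      l.foldl (fun colorArray i =>
        if left < i ∧ i ≤ right then
          if left ≤ i ∧ i ≤ middle then colorArray ++ ["yellow"]
          else colorArray ++ ["black"]
        else colorArray ++ ["White"]) [] =
      l.foldl (fun colorArray i => colorArray ++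
        [if left < i ∧ i ≤ right then
          if left ≤ i ∧ i ≤ middle then "yellow" else "black"
        else "White"]) [] := by
    intro l
    congr 1
    funext acc i
    split_ifs <;> rfl
  rw [this, PySem.List.foldl_append_singleton_eq_map]
  simp only [List.nil_append, List.map_map, Int.sub_zero]
  apply List.map_congr_left
  intro k _
  simp [colourAt]

theorem getColorArray_alt_eq_map (length left middle right : Int) :
    getColorArray_alt length left middle right =
      (List.range length.toNat).map (colourAt left middle right) := by
  unfold getColorArray_alt
  apply List.ext_getElem?
  intro k
  have hlen : (((PySem.List.pyRange (max (left + 1) 0) (min (min middle right + 1) length) 1).foldl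
      (fun cs i => cs.set i.toNat "yellow") (List.replicate length.toNat "White"))).length
      = length.toNat := by rw [foldl_set_length]; simp
  rw [fill_getElem? _ _ _ (le_max_right _ _), hlen,
      fill_getElem? _ _ _ (le_max_right _ _)]
  simp only [List.length_replicate]
  by_cases hk : k < length.toNat
  · have hmap : ((List.range length.toNat).map (colourAt left middle right))[k]? =
        some (colourAt left middle right k) := by
      rw [List.getElem?_map, List.getElem?_range hk]; rfl
    rw [hmap, List.getElem?_replicate]
    unfold colourAt
    split_ifs <;> first | rfl | omega
  · have h1 : ¬ (max (max left middle + 1) 0 ≤ (k:Int) ∧ (k:Int) < min (right + 1) length ∧ k < length.toNat) := by omega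
    have h2 : ¬ (max (left + 1) 0 ≤ (k:Int) ∧ (k:Int) < min (min middle right + 1) length ∧ k < length.toNat) := by omega
    rw [if_neg h1, if_neg h2, List.getElem?_replicate, if_neg hk,
        List.getElem?_map, List.getElem?_eq_none (by simp; omega)]
    rfl

-- ===== VERDICT =====
theorem getColorArray_spec : Claim_equal_getColorArray := by
  intro length left middle right _
  unfold Spec_getColorArray
  rw [getColorArray_eq_map, getColorArray_alt_eq_map]
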